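-- pv_equiv track=rewrite | github.com/ToPola0/kartoteka-main | families_counter.py | count_families
-- ===== SOURCE A (Python) =====
-- from collections import Counter
--
-- def count_families(people_list):
--     """
--     Zlicza rodziny według adresów na podstawie listy osób.
--     Każda osoba to dict z kluczem 'adres'.
--     Zwraca dict:
--         {
--             'family_count_1': ...,
--             'family_count_2': ...,
--             'family_count_3_4': ...,
--             'family_count_5plus': ...
--         }
--     """
--     addresses = [person.get('adres') for person in people_list if person.get('adres')]
--     address_counter = Counter(addresses)
--     result = {
--         'family_count_1': 0,
--         'family_count_2': 0,
--         'family_count_3_4': 0,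
--         'family_count_5plus': 0
--     }
--     for count in address_counter.values():
--         if count == 1:
--             result['family_count_1'] += 1
--         elif count == 2:
--             result['family_count_2'] += 1
--         elif 3 <= count <= 4:
--             result['family_count_3_4'] += 1
--         elif count >= 5:
--             result['family_count_5plus'] += 1
--     return result
-- ===== SOURCE B (Python) =====
-- def _bucket(size):
--     return 0 if size == 1 else 1 if size == 2 else 2 if size <= 4 else 3
--
-- def count_families(people_list):
--     addresses = sorted(a for a in (p.get('adres') for p in people_list) if a)
--     counts = [0, 0, 0, 0]
--     prev = None
--     run = 0
--     for a in addresses: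
--         if a == prev:
--             run += 1
--         else:
--             if run:
--                 counts[_bucket(run)] += 1
--             prev = a
--             run = 1
--     if run:
--         counts[_bucket(run)] += 1
--     return dict(zip(('family_count_1', 'family_count_2',
--                      'family_count_3_4', 'family_count_5plus'), counts))
-- ===== Notes on version B (the rewrite author's own statement) =====
-- stated objective: alternative
-- what changed: Replaces the Counter (hash-map) plus if/elif bucketing loop by sort-then-scan: addresses are sorted and a single pass detects runs of equal addresses, bucketing each run length into the four categories via an index table.
import Mathlib
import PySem

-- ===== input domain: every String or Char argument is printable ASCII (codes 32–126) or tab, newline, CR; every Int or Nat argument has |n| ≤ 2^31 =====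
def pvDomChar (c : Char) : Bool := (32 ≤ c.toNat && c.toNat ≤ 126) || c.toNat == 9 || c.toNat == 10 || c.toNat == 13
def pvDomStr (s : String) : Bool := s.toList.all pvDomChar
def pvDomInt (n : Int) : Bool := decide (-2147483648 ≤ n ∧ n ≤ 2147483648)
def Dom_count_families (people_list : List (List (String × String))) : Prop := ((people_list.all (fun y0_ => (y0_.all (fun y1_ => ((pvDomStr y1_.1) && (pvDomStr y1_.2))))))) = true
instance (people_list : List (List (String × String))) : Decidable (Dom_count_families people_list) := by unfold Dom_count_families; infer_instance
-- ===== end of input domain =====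

-- B replaces A's Counter + if/elif bucketing loop by sort-then-scan over runs of equal
-- addresses (alternative algorithm, not claimed faster).

-- shared first line of both Pythons: [person.get('adres') for person in people_list if person.get('adres')]
def getAddresses (people_list : List (List (String × String))) : List String :=
  people_list.filterMap (fun person =>
    match (PySem.Dict.mk person).get? "adres" with
    | some s => if s = "" then none else some s
    | none => none)

-- ===== PORT A =====
def countFamiliesStep (r : PySem.Dict String Int) (c : Int) : PySem.Dict String Int :=
  if c = 1 then r.modify "family_count_1" 0 (· + 1)
  else if c = 2 then r.modify "family_count_2" 0 (· + 1)
  else if 3 ≤ c ∧ c ≤ 4 then r.modify "family_count_3_4" 0 (· + 1)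
  else if 5 ≤ c then r.modify "family_count_5plus" 0 (· + 1)
  else r

def count_families (people_list : List (List (String × String))) : List (String × Int) :=
  let addresses := getAddresses people_list
  let address_counter := PySem.Dict.counter addresses
  let result : PySem.Dict String Int :=
    PySem.Dict.ofList [("family_count_1", 0), ("family_count_2", 0), ("family_count_3_4", 0), ("family_count_5plus", 0)]
  (address_counter.values.foldl countFamiliesStep result).items

-- ===== PORT B =====
-- _bucket(size): 0 if size == 1 else 1 if size == 2 else 2 if size <= 4 else 3
def bucketIdx (size : Int) : Nat :=
  if size = 1 then 0 else if size = 2 then 1 else if size ≤ 4 then 2 else 3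

-- the body of B's 'for a in addresses' loop; state = (counts, prev, run)
def bStep (st : List Int × Option String × Int) (a : String) : List Int × Option String × Int :=
  if some a = st.2.1 then (st.1, st.2.1, st.2.2 + 1)
  else ((if st.2.2 ≠ 0 then st.1.modify (bucketIdx st.2.2) (· + 1) else st.1), some a, 1)

-- the trailing 'if run: counts[_bucket(run)] += 1'
def bFinal (st : List Int × Option String × Int) : List Int :=
  if st.2.2 ≠ 0 then st.1.modify (bucketIdx st.2.2) (· + 1) else st.1

def count_families_alt (people_list : List (List (String × String))) : List (String × Int) :=
  let addresses := PySem.List.sorted (getAddresses people_list) (fun x => x) false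
  let counts := bFinal (addresses.foldl bStep ([0, 0, 0, 0], none, 0))
  (PySem.Dict.ofList (List.zip ["family_count_1", "family_count_2", "family_count_3_4", "family_count_5plus"] counts)).items

-- ===== PRECONDITION & SPEC =====
def Spec_count_families (people_list : List (List (String × String))) (out : List (String × Int)) : Prop := out = count_families_alt people_list
instance (people_list : List (List (String × String))) (out : List (String × Int)) : Decidable (Spec_count_families people_list out) := by unfold Spec_count_families; infer_instance

-- ===== CLAIM (what is proved, stated in full; the proofs are below) =====
def Claim_equal_count_families : Prop := ∀ (people_list : List (List (String × String))), Dom_count_families people_list → Spec_count_families people_list (count_families people_list)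

-- ===== LEMMAS AND PROOFS =====

------------------------------------------------------------------------------
-- A side: the if/elif loop counts each bucket of the values list.
------------------------------------------------------------------------------

def resD (a b c e : Int) : PySem.Dict String Int :=
  PySem.Dict.mk [("family_count_1", a), ("family_count_2", b), ("family_count_3_4", c), ("family_count_5plus", e)]

theorem ofList_resD (a b c e : Int) :
    PySem.Dict.ofList [("family_count_1", a), ("family_count_2", b), ("family_count_3_4", c), ("family_count_5plus", e)]
      = resD a b c e := rfl

theorem stepA_one (a b c e : Int) : countFamiliesStep (resD a b c e) 1 = resD (a + 1) b c e := rfl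
theorem stepA_two (a b c e : Int) : countFamiliesStep (resD a b c e) 2 = resD a (b + 1) c e := rfl
theorem stepA_three (a b c e : Int) : countFamiliesStep (resD a b c e) 3 = resD a b (c + 1) e := rfl
theorem stepA_four (a b c e : Int) : countFamiliesStep (resD a b c e) 4 = resD a b (c + 1) e := rfl
theorem stepA_five (a b c e v : Int) (h : 5 ≤ v) :
    countFamiliesStep (resD a b c e) v = resD a b c (e + 1) := by
  unfold countFamiliesStep
  rw [if_neg (by omega), if_neg (by omega), if_neg (by omega), if_pos h]
  rfl
theorem stepA_other (a b c e v : Int) (h : v ≤ 0) :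
    countFamiliesStep (resD a b c e) v = resD a b c e := by
  unfold countFamiliesStep
  rw [if_neg (by omega), if_neg (by omega), if_neg (by omega), if_neg (by omega)]

theorem loopA_eq (vs : List Int) : ∀ (a b c e : Int),
    (vs.foldl countFamiliesStep (resD a b c e)).items
    = [("family_count_1", a + vs.count 1),
       ("family_count_2", b + vs.count 2),
       ("family_count_3_4", c + (vs.count 3 + vs.count 4)),
       ("family_count_5plus", e + (vs.countP (fun v => decide (5 ≤ v)) : Int))] := by
  induction vs with
  | nil => intro a b c e; simp [resD]
  | cons v vs ih =>
    intro a b c e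
    rw [List.foldl_cons]
    rcases (by omega : v = 1 ∨ v = 2 ∨ v = 3 ∨ v = 4 ∨ 5 ≤ v ∨ v ≤ 0) with h | h | h | h | h | h
    · subst h; rw [stepA_one, ih]; simp; ring
    · subst h; rw [stepA_two, ih]; simp; ring
    · subst h; rw [stepA_three, ih]; simp; ring
    · subst h; rw [stepA_four, ih]; simp; ring
    · rw [stepA_five a b c e v h, ih]
      have n1 : v ≠ 1 := by omega
      have n2 : v ≠ 2 := by omega
      have n3 : v ≠ 3 := by omega
      have n4 : v ≠ 4 := by omega
      simp [n1, n2, n3, n4, h]; ring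
    · rw [stepA_other a b c e v h, ih]
      have n1 : v ≠ 1 := by omega
      have n2 : v ≠ 2 := by omega
      have n3 : v ≠ 3 := by omega
      have n4 : v ≠ 4 := by omega
      have n5 : ¬ (5 ≤ v) := by omega
      simp [n1, n2, n3, n4, n5]

------------------------------------------------------------------------------
-- B side: run lengths of a list, and the loop computes bucket counts of them.
------------------------------------------------------------------------------

def runGo (x : String) (r : Int) : List String → List Int
  | [] => [r]
  | a :: m => if a = x then runGo x (r + 1) m else r :: runGo a 1 m

def runLengths : List String → List Int
  | [] => []
  | x :: m => runGo x 1 m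

theorem runGo_eq (m : List String) : ∀ (x : String) (r : Int),
    runGo x r m = (r + ((m.takeWhile (fun b => b == x)).length : Int))
      :: runLengths (m.dropWhile (fun b => b == x)) := by
  induction m with
  | nil => intro x r; simp [runGo, runLengths]
  | cons a m ih =>
    intro x r
    by_cases h : a = x
    · subst h
      rw [show runGo a r (a :: m) = runGo a (r + 1) m from by simp [runGo], ih a (r + 1),
        show (a :: m).takeWhile (fun b => b == a) = a :: m.takeWhile (fun b => b == a) from by simp,
        show (a :: m).dropWhile (fun b => b == a) = m.dropWhile (fun b => b == a) from by simp,
        List.length_cons]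
      congr 1
      push_cast; ring
    · have hb : (a == x) = false := by simp [h]
      simp [runGo, h, runLengths, hb]

theorem loopB_eq (m : List String) : ∀ (x : String) (k p q r s : Int), 1 ≤ k →
    bFinal (m.foldl bStep ([p, q, r, s], some x, k))
      = [p + ((runGo x k m).count 1 : Int),
         q + ((runGo x k m).count 2 : Int),
         r + (((runGo x k m).count 3 : Int) + ((runGo x k m).count 4 : Int)),
         s + (((runGo x k m).countP (fun v => decide (5 ≤ v))) : Int)] := by
  induction m with
  | nil =>
    intro x k p q r s hk
    have hk0 : k ≠ 0 := by omega
    simp only [List.foldl_nil, bFinal, if_pos hk0, runGo]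
    rcases (by omega : k = 1 ∨ k = 2 ∨ k = 3 ∨ k = 4 ∨ 5 ≤ k) with h | h | h | h | h
    · subst h; simp [bucketIdx, List.modify]
    · subst h; simp [bucketIdx, List.modify]
    · subst h; simp [bucketIdx, List.modify]
    · subst h; simp [bucketIdx, List.modify]
    · have n1 : k ≠ 1 := by omega
      have n2 : k ≠ 2 := by omega
      have n3 : k ≠ 3 := by omega
      have n4 : k ≠ 4 := by omega
      have n5 : ¬ (k ≤ 4) := by omega
      simp [bucketIdx, n1, n2, n3, n4, n5, h, List.modify]
  | cons a m ih =>
    intro x k p q r s hk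
    by_cases h : a = x
    · subst h
      have : bStep ([p, q, r, s], some a, k) a = ([p, q, r, s], some a, k + 1) := by
        simp [bStep]
      rw [List.foldl_cons, this, ih a (k + 1) p q r s (by omega)]
      simp [runGo]
    · have hk0 : k ≠ 0 := by omega
      have hst : bStep ([p, q, r, s], some x, k) a
          = (List.modify [p, q, r, s] (bucketIdx k) (· + 1), some a, 1) := by
        simp [bStep, h, hk0]
      have hrun : runGo x k (a :: m) = k :: runGo a 1 m := by
        simp [runGo, h]
      rw [List.foldl_cons, hst, hrun]
      rcases (by omega : k = 1 ∨ k = 2 ∨ k = 3 ∨ k = 4 ∨ 5 ≤ k) with hc | hc | hc | hc | hc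
      · subst hc
        rw [show List.modify [p, q, r, s] (bucketIdx 1) (· + 1) = [p + 1, q, r, s] from rfl,
          ih a 1 (p + 1) q r s le_rfl]
        simp; ring
      · subst hc
        rw [show List.modify [p, q, r, s] (bucketIdx 2) (· + 1) = [p, q + 1, r, s] from rfl,
          ih a 1 p (q + 1) r s le_rfl]
        simp; ring
      · subst hc
        rw [show List.modify [p, q, r, s] (bucketIdx 3) (· + 1) = [p, q, r + 1, s] from rfl,
          ih a 1 p q (r + 1) s le_rfl]
        simp; ring
      · subst hc
        rw [show List.modify [p, q, r, s] (bucketIdx 4) (· + 1) = [p, q, r + 1, s] from rfl,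
          ih a 1 p q (r + 1) s le_rfl]
        simp; ring
      · have n1 : k ≠ 1 := by omega
        have n2 : k ≠ 2 := by omega
        have n3 : k ≠ 3 := by omega
        have n4 : k ≠ 4 := by omega
        have n5 : ¬ (k ≤ 4) := by omega
        rw [show List.modify [p, q, r, s] (bucketIdx k) (· + 1)
              = [p, q, r, s + 1] from by simp [bucketIdx, n1, n2, n5, List.modify],
          ih a 1 p q r (s + 1) le_rfl]
        simp [n1, n2, n3, n4, hc]; ring

-- B's whole body in terms of run lengths of the sorted address list
theorem alt_eq (people_list : List (List (String × String))) :
    count_families_alt people_list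
      = [("family_count_1", ((runLengths (PySem.List.sorted (getAddresses people_list) (fun x => x) false)).count 1 : Int)),
         ("family_count_2", ((runLengths (PySem.List.sorted (getAddresses people_list) (fun x => x) false)).count 2 : Int)),
         ("family_count_3_4", (((runLengths (PySem.List.sorted (getAddresses people_list) (fun x => x) false)).count 3 : Int) + ((runLengths (PySem.List.sorted (getAddresses people_list) (fun x => x) false)).count 4 : Int))),
         ("family_count_5plus", (((runLengths (PySem.List.sorted (getAddresses people_list) (fun x => x) false)).countP (fun v => decide (5 ≤ v))) : Int))] := by
  unfold count_families_alt
  cases hm : PySem.List.sorted (getAddresses people_list) (fun x => x) false with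
  | nil => simp [runLengths, bFinal]; rfl
  | cons x m =>
    have h0 : bStep ([0, 0, 0, 0], none, 0) x = ([0, 0, 0, 0], some x, 1) := by
      simp [bStep]
    dsimp only
    rw [List.foldl_cons, h0, loopB_eq m x 1 0 0 0 0 le_rfl]
    simp only [runLengths, zero_add]
    rfl

------------------------------------------------------------------------------
-- run lengths of a sorted list = multiplicities of its distinct elements
------------------------------------------------------------------------------

theorem dropWhile_ne_of_sorted (xs : List String) (x : String) :
    xs.Pairwise (· ≤ ·) → (∀ y ∈ xs, x ≤ y) →
    ∀ z ∈ xs.dropWhile (fun b => b == x), z ≠ x := by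
  induction xs with
  | nil => intro _ _ z hz; simp at hz
  | cons a xs ih =>
    intro hp hle z hz
    by_cases h : a = x
    · rw [List.dropWhile_cons, if_pos (by simp [h])] at hz
      exact ih (List.pairwise_cons.mp hp).2 (fun y hy => hle y (List.mem_cons_of_mem a hy)) z hz
    · rw [List.dropWhile_cons, if_neg (by simp [h])] at hz
      have hxa : x < a := lt_of_le_of_ne (hle a List.mem_cons_self) (Ne.symm h)
      rcases List.mem_cons.mp hz with rfl | hz'
      · exact Ne.symm (ne_of_lt hxa)
      · have : a ≤ z := (List.pairwise_cons.mp hp).1 z hz'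
        exact Ne.symm (ne_of_lt (lt_of_lt_of_le hxa this))

theorem countP_runLengths_sorted : ∀ (n : Nat) (m : List String), m.length ≤ n →
    m.Pairwise (· ≤ ·) → ∀ (p : Int → Bool),
    (runLengths m).countP p
      = (PySem.Set.ofList m).countP (fun k => p ((m.count k : Nat) : Int)) := by
  intro n
  induction n with
  | zero =>
    intro m hlen _ p
    have : m = [] := List.eq_nil_of_length_eq_zero (Nat.le_zero.mp hlen)
    subst this; rfl
  | succ n ih =>
    intro m hlen hp p
    cases m with
    | nil => rfl
    | cons x xs =>
      have hpx : ∀ y ∈ xs, x ≤ y := (List.pairwise_cons.mp hp).1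
      have hpxs : xs.Pairwise (· ≤ ·) := (List.pairwise_cons.mp hp).2
      set t := xs.takeWhile (fun b => b == x) with ht
      set rest := xs.dropWhile (fun b => b == x) with hrest
      have hsplit : t ++ rest = xs := List.takeWhile_append_dropWhile
      have htx : ∀ z ∈ t, z = x := fun z hz => by
        have := List.mem_takeWhile_imp hz; simpa using this
      have hrx : ∀ z ∈ rest, z ≠ x := dropWhile_ne_of_sorted xs x hpxs hpx
      have hrsub : rest.Sublist xs := List.dropWhile_sublist _
      have hrp : rest.Pairwise (· ≤ ·) := hpxs.sublist hrsub
      have hrlen : rest.length ≤ n := by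
        have h1 : rest.length ≤ xs.length := hrsub.length_le
        have h2 : xs.length + 1 ≤ n + 1 := by simpa using hlen
        omega
      -- membership in x :: xs is x or membership in rest
      have hmem : ∀ a, a ∈ x :: xs ↔ a = x ∨ a ∈ rest := by
        intro a
        constructor
        · intro h
          rcases List.mem_cons.mp h with rfl | h'
          · exact Or.inl rfl
          · rw [← hsplit] at h'
            rcases List.mem_append.mp h' with h'' | h''
            · exact Or.inl (htx a h'')
            · exact Or.inr h''
        · rintro (rfl | h')
          · exact List.mem_cons_self
          · exact List.mem_cons_of_mem x (hsplit ▸ List.mem_append_right t h')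
      -- counts
      have hcount_t : t.count x = t.length := by
        rw [List.count_eq_length]
        intro z hz; simp [htx z hz]
      have hcount_restx : rest.count x = 0 := by
        rw [List.count_eq_zero]
        intro h; exact hrx x h rfl
      have hcx : (x :: xs).count x = 1 + t.length := by
        rw [← hsplit, List.count_cons, List.count_append, hcount_t, hcount_restx]
        simp [Nat.add_comm]
      have hck : ∀ k ∈ rest, (x :: xs).count k = rest.count k := by
        intro k hk
        have hkx : k ≠ x := hrx k hk
        have hcount_tk : t.count k = 0 := by
          rw [List.count_eq_zero]
          intro h; exact hkx (htx k h)
        rw [← hsplit, List.count_cons, List.count_append, hcount_tk]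
        simp [(Ne.symm hkx : ¬ x = k)]
      -- the distinct-element lists are a permutation
      have hxnotin : x ∉ PySem.Set.ofList rest := by
        rw [PySem.Set.mem_ofList]
        intro h; exact hrx x h rfl
      have hperm : (PySem.Set.ofList (x :: xs)).Perm (x :: PySem.Set.ofList rest) := by
        rw [List.perm_ext_iff_of_nodup (PySem.Set.nodup_ofList _)
          (List.nodup_cons.mpr ⟨hxnotin, PySem.Set.nodup_ofList _⟩)]
        intro a
        rw [PySem.Set.mem_ofList, hmem a, List.mem_cons, PySem.Set.mem_ofList]
      -- put it together
      have hrun : runLengths (x :: xs) = (1 + (t.length : Int)) :: runLengths rest := by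
        simp [runLengths, runGo_eq xs x 1, ht, hrest]
      have hcongr : List.countP (fun k => p ((((x :: xs).count k : Nat)) : Int)) (PySem.Set.ofList rest)
          = List.countP (fun k => p (((rest.count k : Nat)) : Int)) (PySem.Set.ofList rest) := by
        apply List.countP_congr
        intro k hk
        simp only [hck k ((PySem.Set.mem_ofList _ _).mp hk)]
      rw [hrun, List.countP_cons,
        (hperm.countP_eq (fun k => p ((((x :: xs).count k : Nat)) : Int))),
        List.countP_cons, hcx, hcongr,
        ← ih rest hrlen hrp p]
      have : ((1 + t.length : Nat) : Int) = 1 + (t.length : Int) := by push_cast; ring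
      rw [this]

-- transfer: any countP over run lengths of the sorted list equals the same countP
-- over the multiset of multiplicities of the original list
theorem countP_transfer (l : List String) (p : Int → Bool) :
    (runLengths (PySem.List.sorted l (fun x => x) false)).countP p
      = ((PySem.Set.ofList l).map (fun k => ((l.count k : Nat) : Int))).countP p := by
  set m := PySem.List.sorted l (fun x => x) false with hm
  have hpair : m.Pairwise (· ≤ ·) := by
    have := PySem.List.sorted_pairwise l (fun x => x)
    simpa [hm] using this
  rw [countP_runLengths_sorted m.length m le_rfl hpair p]
  have hmp : m.Perm l := PySem.List.sorted_perm l (fun x => x) false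
  have hsetperm : (PySem.Set.ofList m).Perm (PySem.Set.ofList l) := by
    rw [List.perm_ext_iff_of_nodup (PySem.Set.nodup_ofList _) (PySem.Set.nodup_ofList _)]
    intro a
    rw [PySem.Set.mem_ofList, PySem.Set.mem_ofList]
    exact hmp.mem_iff
  have hcongr : List.countP (fun k => p ((m.count k : Nat) : Int)) (PySem.Set.ofList m)
      = List.countP (fun k => p ((l.count k : Nat) : Int)) (PySem.Set.ofList m) := by
    apply List.countP_congr
    intro k _
    simp only [hmp.count_eq k]
  rw [hcongr, hsetperm.countP_eq, List.countP_map]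
  rfl

theorem count_transfer (l : List String) (v : Int) :
    (runLengths (PySem.List.sorted l (fun x => x) false)).count v
      = ((PySem.Set.ofList l).map (fun k => ((l.count k : Nat) : Int))).count v := by
  rw [List.count_eq_countP, List.count_eq_countP]
  exact countP_transfer l (fun x => x == v)

-- ===== VERDICT (by name: the statement is the Claim_ definition above) =====
theorem count_families_spec : Claim_equal_count_families := by
  intro people_list _
  unfold Spec_count_families
  rw [alt_eq]
  unfold count_families
  rw [ofList_resD, loopA_eq]
  have hvals : (PySem.Dict.counter (getAddresses people_list)).values
      = (PySem.Set.ofList (getAddresses people_list)).map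
          (fun k => (((getAddresses people_list).count k : Nat) : Int)) := by
    show ((PySem.Dict.counter (getAddresses people_list)).items.map (·.2)) = _
    rw [PySem.Dict.items_counter, List.map_map]
    rfl
  rw [hvals, count_transfer, count_transfer, count_transfer, count_transfer,
    countP_transfer]
  simp
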